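-- pv_equiv track=rewrite | github.com/USATimothy/babynames | babynameread.py | reducename
-- ===== SOURCE A (Python) =====
-- def reducename(Name):
--     table={'a':'e','d':'t','f':'b','h':'*','i':'e','p':'b','q':'k','v':'b','w':'*','x':'ks','y':'e','z':'s'}
--     name=Name.lower()
--     #convert to list, to enable slicing and item assignment
--     n=len(name)
--     letters=list(name)
--     #replace c with k or s
--     for i in range(n):
--         if letters[i]=='c':
--             if i+1==n or not letters[i+1] in ['e','i','y']:
--                 letters[i]='k'
--             else:
--                 letters[i]='s'
--      #replace g with k or j
--         if letters[i]=='g':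
--             if i+1==n or not letters[i+1] in ['e','i','y']:
--                 letters[i]='k'
--             else:
--                 letters[i]='j'
--     #Replace a,i,y with e. Replace many consonants
--     for i in range(n):
--         if letters[i] in table:
--             letters[i]=table[letters[i]]
--     #Remove doubles
--     for i in range(n):
--         if i>0 and letters[i]==letters[i-1]:
--             letters[i]='!'
--     reduced=''
--     #Convert back to string
--     for char in letters:
--         if char !='!' and char!='*':
--             reduced+=char
--     #Remove last vowel
--     if reduced[-1]=='e':
--         return reduced[:-1]
--     return reduced
-- ===== SOURCE B (Python) =====
-- def reducename(Name):
--     table = {'a': 'e', 'd': 't', 'f': 'b', 'h': '*', 'i': 'e', 'p': 'b',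
--              'q': 'k', 'v': 'b', 'w': '*', 'x': 'ks', 'y': 'e', 'z': 's'}
--     s = Name.lower()
--     n = len(s)
--
--     # derive the phonetic token of position i from the original string alone
--     def tok(i):
--         c = s[i]
--         if c in 'cg':
--             if s[i + 1:i + 2] in ('e', 'i', 'y'):
--                 return 's' if c == 'c' else 'j'
--             return 'k'
--         return table.get(c, c)
--
--     toks = [tok(i) for i in range(n)]
--     # run-length pass: a run of L equal tokens keeps ceil(L/2) copies
--     # ('remove doubles' alternates keep/drop inside a run); '*' and '!' runs vanish
--     parts = []
--     i = 0
--     while i < n: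
--         j = i + 1
--         while j < n and toks[j] == toks[i]:
--             j += 1
--         if toks[i] != '!' and toks[i] != '*':
--             parts.append(toks[i] * ((j - i + 1) // 2))
--         i = j
--     reduced = ''.join(parts)
--     if reduced and reduced[-1] == 'e':
--         return reduced[:-1]
--     return reduced
-- ===== Notes on version B (the rewrite author's own statement) =====
-- stated objective: alternative
-- what changed: A mutates a list through four sequential passes (c/g rewrite, table substitution, marking doubles with '!' sentinels, filtering sentinels); B derives each position's phonetic token purely from the original string, then run-length encodes the token list, emitting ceil(L/2) copies of each run of length L (the keep/drop alternation that 'remove doubles' performs) and dropping '*' and '!' runs entirely - no mutation, no sentinel marking pass.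
-- outside the precondition, e.g. on reducename('hh'): A raises IndexError, B returns ''; on reducename(''): A raises IndexError, B returns ''; on reducename('h'): A raises IndexError, B returns ''
import Mathlib
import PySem

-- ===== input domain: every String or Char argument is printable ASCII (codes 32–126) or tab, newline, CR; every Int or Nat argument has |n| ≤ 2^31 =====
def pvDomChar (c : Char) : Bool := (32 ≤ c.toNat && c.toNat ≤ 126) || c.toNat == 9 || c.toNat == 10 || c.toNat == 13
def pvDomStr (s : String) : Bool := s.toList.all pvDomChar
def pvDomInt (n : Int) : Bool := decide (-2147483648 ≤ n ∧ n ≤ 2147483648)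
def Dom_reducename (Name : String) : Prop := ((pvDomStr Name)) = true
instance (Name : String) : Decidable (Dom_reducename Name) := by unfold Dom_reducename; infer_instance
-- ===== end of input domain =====

-- B replaces A's four index-mutation passes (c/g rewrite, substitution, '!'-marking of
-- doubles, sentinel filtering) by a pure token map plus a run-length scan that keeps
-- ceil(L/2) copies of each run (objective: alternative, same O(n) cost).

-- one-character string, as the elements of Python's list(name)
def mkS (c : Char) : String := String.ofList [c]

-- ===== PORT A =====
def tableA : PySem.Dict String String :=
  PySem.Dict.ofList [("a","e"),("d","t"),("f","b"),("h","*"),("i","e"),("p","b"),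
                     ("q","k"),("v","b"),("w","*"),("x","ks"),("y","e"),("z","s")]

-- one iteration of A's first loop (c → k/s, then g → k/j); every index it touches is in
-- range for i ∈ range(n), so getD "" is exact there
def stepA1 (n : Int) (ls : List String) (i : Int) : List String :=
  let ls1 :=
    if ls.getD i.toNat "" == "c" then
      if i + 1 == n || !(["e","i","y"].contains (ls.getD (i.toNat + 1) "")) then
        ls.set i.toNat "k"
      else ls.set i.toNat "s"
    else ls
  if ls1.getD i.toNat "" == "g" then
    if i + 1 == n || !(["e","i","y"].contains (ls1.getD (i.toNat + 1) "")) then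
      ls1.set i.toNat "k"
    else ls1.set i.toNat "j"
  else ls1

-- one iteration of A's second loop (letters[i] in table → table lookup)
def stepA2 (ls : List String) (i : Int) : List String :=
  if tableA.contains (ls.getD i.toNat "") then
    ls.set i.toNat ((tableA.get? (ls.getD i.toNat "")).getD "")
  else ls

-- one iteration of A's third loop (mark doubles with '!')
def stepA3 (ls : List String) (i : Int) : List String :=
  if 0 < i && ls.getD i.toNat "" == ls.getD (i.toNat - 1) "" then ls.set i.toNat "!" else ls

def reducename (Name : String) : String :=
  let name := PySem.Str.lower Name
  let n : Int := PySem.Str.len name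
  let letters0 := name.toList.map mkS
  let l1 := (PySem.List.pyRange 0 n 1).foldl (stepA1 n) letters0
  let l2 := (PySem.List.pyRange 0 n 1).foldl stepA2 l1
  let l3 := (PySem.List.pyRange 0 n 1).foldl stepA3 l2
  -- reduced += char, ported on the char-list side
  let reduced := l3.foldl (fun acc ch => if ch != "!" && ch != "*" then acc ++ ch.toList else acc)
                   ([] : List Char)
  match PySem.List.pyGet? reduced (-1) with  -- reduced[-1]
  | some c => if c == 'e' then String.ofList reduced.dropLast  -- reduced[:-1]
              else String.ofList reduced
  | none => ""  -- IndexError in Python; excluded by Pre_reducename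

-- ===== PORT B =====
def tableB : PySem.Dict String String :=
  PySem.Dict.ofList [("a","e"),("d","t"),("f","b"),("h","*"),("i","e"),("p","b"),
                     ("q","k"),("v","b"),("w","*"),("x","ks"),("y","e"),("z","s")]

-- Source B's tok(i): the phonetic token of position i, read off the original string
-- (s[i] is in range for i ∈ range(n), so pyGetD is exact; s[i+1:i+2] is a slice)
def tokB (s : List Char) (i : Nat) : String :=
  let c := PySem.List.pyGetD s (i : Int) ' '
  if c == 'c' || c == 'g' then  -- c in 'cg' for a single char
    if ["e","i","y"].contains
        (String.ofList (PySem.List.slice s (some ((i : Int) + 1)) (some ((i : Int) + 2)))) then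
      if c == 'c' then "s" else "j"
    else "k"
  else (tableB.get? (mkS c)).getD (mkS c)  -- table.get(c, c)

-- Source B's inner while: advance j over the run of tokens equal to x
-- (fuel-structured recursion; fuel = toks.length always suffices, a totality guard only)
def scanB (toks : List String) (x : String) : Nat → Nat → Nat
  | 0, j => j
  | fuel + 1, j =>
    if j < toks.length && toks.getD j "" == x then scanB toks x fuel (j + 1) else j

-- Source B's outer while: one run per step; emit toks[i] * ((j-i+1)//2) unless '!' or '*'
def runsB (toks : List String) : Nat → Nat → List Char
  | 0, _ => []
  | fuel + 1, i =>
    if i < toks.length then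
      let x := toks.getD i ""
      let j := scanB toks x toks.length (i + 1)
      (if x != "!" && x != "*" then (List.replicate ((j - i + 1) / 2) x.toList).flatten else [])
        ++ runsB toks fuel j
    else []

def reducename_alt (Name : String) : String :=
  let s := (PySem.Str.lower Name).toList
  let n := s.length
  let toks := (PySem.List.pyRange 0 (n : Int) 1).map (fun i => tokB s i.toNat)
  let reduced := runsB toks toks.length 0  -- ''.join(parts)
  if reduced != [] && PySem.List.pyGet? reduced (-1) == some 'e' then
    String.ofList reduced.dropLast
  else String.ofList reduced

-- ===== PRECONDITION & SPEC =====
-- Pre_ excludes exactly the inputs on which Python A raises IndexError (reduced[-1] on an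
-- empty result): the strings, including "", all of whose lowercased characters are
-- 'h', 'w', '*' or '!' — every such character reduces to nothing.
def Pre_reducename (Name : String) : Prop :=
  ((PySem.Str.lower Name).toList.all
    (fun c => c == 'h' || c == 'w' || c == '*' || c == '!')) = false
instance (Name : String) : Decidable (Pre_reducename Name) := by
  unfold Pre_reducename; infer_instance

def pvWitness_reducename : String := "Ann"

def Spec_reducename (Name : String) (out : String) : Prop := out = reducename_alt Name
instance (Name : String) (out : String) : Decidable (Spec_reducename Name out) := by
  unfold Spec_reducename; infer_instance

-- ===== CLAIM (what is proved, stated in full; the proofs are below) =====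
def Claim_equal_reducename : Prop :=
  ∀ (Name : String), Dom_reducename Name → Pre_reducename Name →
    Spec_reducename Name (reducename Name)

-- ===== LEMMAS AND PROOFS =====

-- specification-level descriptions of the passes
def nbrIn (nxt : Option Char) : Bool := nxt == some 'e' || nxt == some 'i' || nxt == some 'y'

def d1 (c : Char) (nxt : Option Char) : String :=
  if c = 'c' then (if nbrIn nxt then "s" else "k")
  else if c = 'g' then (if nbrIn nxt then "j" else "k")
  else mkS c

def mapNbr : List Char → List String
  | [] => []
  | c :: rest => d1 c rest.head? :: mapNbr rest

def d2 (x : String) : String := (tableA.get? x).getD x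

def dedup : Option String → List String → List String
  | _, [] => []
  | p, x :: xs => let y := if p == some x then "!" else x; y :: dedup (some y) xs

def collect : List String → List Char
  | [] => []
  | x :: xs => (if x != "!" && x != "*" then x.toList else []) ++ collect xs

-- structural description of B's run-length scan
def runsL : List String → List Char
  | [] => []
  | x :: r =>
    (if x != "!" && x != "*" then
       (List.replicate (((r.takeWhile (· == x)).length + 2) / 2) x.toList).flatten
     else [])
      ++ runsL (r.dropWhile (· == x))
termination_by l => l.length
decreasing_by
  have := List.length_dropWhile_le (· == x) r
  simp only [List.length_cons]
  omega

lemma ofList_inj (l l' : List Char) : (String.ofList l = String.ofList l') ↔ l = l' := by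
  constructor
  · intro h; have := congrArg String.toList h; simpa using this
  · intro h; rw [h]

lemma mkS_eq_iff (y : Char) (c : Char) : (mkS y = mkS c) ↔ y = c := by
  simp [mkS, ofList_inj]

lemma mkS_beq_lit (z c : Char) : (mkS z == mkS c) = (z == c) := by
  by_cases h : z = c
  · subst h; simp
  · have h1 : ¬ (mkS z = mkS c) := fun hc => h ((mkS_eq_iff z c).mp hc)
    simp [h, h1]

lemma contains_eiy (z : Char) :
    ((["e","i","y"] : List String).contains (mkS z)) = nbrIn (some z) := by
  have h : (["e","i","y"] : List String) = [mkS 'e', mkS 'i', mkS 'y'] := rfl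
  rw [h]
  simp only [List.contains_cons, List.contains_nil, Bool.or_false, mkS_beq_lit, nbrIn]
  simp [Bool.or_assoc]

lemma length_mapNbr (l : List Char) : (mapNbr l).length = l.length := by
  induction l with
  | nil => rfl
  | cons c rest ih => simp [mapNbr, ih]

-- a foldl over pyRange 0 n 1 (n a Nat) is a foldl over List.range n
lemma foldl_pyRange_zero_nat {α : Type} (m : Nat) (f : α → Int → α) (init : α) :
    (PySem.List.pyRange 0 m 1).foldl f init
      = (List.range m).foldl (fun acc (k : Nat) => f acc (k : Int)) init := by
  rw [PySem.List.pyRange_one]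
  have h1 : ((m : Int) - 0).toNat = m := by omega
  rw [h1, List.foldl_map]
  simp only [zero_add]

lemma append_cons_getD {α : Type} [Inhabited α] (done : List α) (x d : α) (xs : List α) :
    (done ++ x :: xs).getD done.length d = x := by
  simp [List.getD]

lemma append_cons_getD_succ {α : Type} [Inhabited α] (done : List α) (x d : α) (xs : List α) :
    (done ++ x :: xs).getD (done.length + 1) d = (xs.head?).getD d := by
  rw [List.getD, List.getElem?_append_right (by omega)]
  simp
  cases xs <;> simp

lemma append_cons_set {α : Type} (done : List α) (x v : α) (xs : List α) :
    (done ++ x :: xs).set done.length v = done ++ v :: xs := by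
  rw [List.set_append_right _ _ (Nat.le_refl _)]
  simp

lemma append_getD_pred {α : Type} (done : List α) (h : done ≠ []) (d : α) (rest : List α) :
    (done ++ rest).getD (done.length - 1) d = done.getLast h := by
  have hlt : done.length - 1 < done.length := by
    have := List.length_pos_iff.mpr h; omega
  rw [List.getD, List.getElem?_append_left hlt]
  rw [List.getLast_eq_getElem]
  simp [List.getElem?_eq_getElem hlt]

-- the next-neighbour test of pass 1, reduced to nbrIn on the original chars
lemma cond_eq (done : List String) (x : String) (xs : List Char) (n : Int)
    (hn : n = done.length + (1 + xs.length)) :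
    ((((done.length : Nat) : Int) + 1 == n)
      || !(["e","i","y"].contains ((done ++ x :: xs.map mkS).getD ((done.length : Nat) + 1) "")))
    = !(nbrIn xs.head?) := by
  rw [append_cons_getD_succ]
  cases xs with
  | nil =>
    have h1 : (((done.length : Nat) : Int) + 1 == n) = true := by
      simp [hn]
    simp [h1, nbrIn]
  | cons y ys =>
    have h1 : (((done.length : Nat) : Int) + 1 == n) = false := by
      simp only [beq_eq_false_iff_ne, ne_eq]
      rw [hn]
      push_cast [List.length_cons]
      intro h
      omega
    rw [h1]
    simp only [List.map_cons, List.head?_cons, Option.getD_some, Bool.false_or]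
    rw [contains_eiy]

-- one iteration of pass 1 on the current cell
lemma stepA1_eq (done : List String) (x : Char) (xs : List Char) (n : Int)
    (hn : n = done.length + (1 + xs.length)) :
    stepA1 n (done ++ mkS x :: xs.map mkS) ((done.length : Nat) : Int)
      = done ++ d1 x xs.head? :: xs.map mkS := by
  unfold stepA1
  simp only [Int.toNat_natCast]
  rw [cond_eq done (mkS x) xs n hn, append_cons_getD]
  by_cases hc : x = 'c'
  · subst hc
    rw [show (mkS 'c' == ("c" : String)) = true from rfl]
    by_cases hnb : nbrIn xs.head? = true
    · simp only [hnb, Bool.not_true, if_true, Bool.false_eq_true, if_false,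
        append_cons_set, append_cons_getD]
      rw [show (("s" : String) == ("g" : String)) = false from rfl]
      simp [d1, hnb]
    · simp only [Bool.not_eq_true] at hnb
      simp only [hnb, Bool.not_false, if_true, append_cons_set, append_cons_getD]
      rw [show (("k" : String) == ("g" : String)) = false from rfl]
      simp [d1, hnb]
  · have hbc : (mkS x == ("c" : String)) = false := by
      have h2 := mkS_beq_lit x 'c'
      simp only [show mkS 'c' = ("c" : String) from rfl] at h2
      rw [h2]; simp [hc]
    rw [hbc]
    simp only [Bool.false_eq_true, if_false]
    rw [append_cons_getD, cond_eq done (mkS x) xs n hn]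
    by_cases hg : x = 'g'
    · subst hg
      rw [show (mkS 'g' == ("g" : String)) = true from rfl]
      by_cases hnb : nbrIn xs.head? = true
      · simp only [hnb, Bool.not_true, if_true, Bool.false_eq_true, if_false, append_cons_set]
        simp [d1, hnb]
      · simp only [Bool.not_eq_true] at hnb
        simp only [hnb, Bool.not_false, if_true, append_cons_set]
        simp [d1, hnb]
    · have hbg : (mkS x == ("g" : String)) = false := by
        have h2 := mkS_beq_lit x 'g'
        simp only [show mkS 'g' = ("g" : String) from rfl] at h2
        rw [h2]; simp [hg]
      rw [hbg]
      simp [d1, hc, hg]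

-- ===== pass 1 =====
lemma pass1_loop (n : Int) (todo : List Char) : ∀ (done : List String),
    n = done.length + todo.length →
    (List.range' done.length todo.length).foldl (fun ls (k : Nat) => stepA1 n ls (k : Int))
        (done ++ todo.map mkS)
      = done ++ mapNbr todo := by
  induction todo with
  | nil => intro done _; simp [mapNbr]
  | cons x xs ih =>
    intro done hn
    rw [List.length_cons, List.range'_succ, List.foldl_cons, List.map_cons]
    have hn' : n = done.length + (1 + xs.length) := by
      rw [hn]; push_cast [List.length_cons]; ring
    rw [stepA1_eq done x xs n hn']
    have := ih (done ++ [d1 x xs.head?])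
      (by rw [hn]; push_cast [List.length_cons, List.length_append, List.length_singleton,
              List.length_nil]; ring)
    simp only [List.length_append, List.length_singleton, List.append_assoc,
      List.singleton_append] at this
    rw [this, mapNbr]

-- ===== pass 2 =====
lemma pass2_loop (todo : List String) : ∀ (done : List String),
    (List.range' done.length todo.length).foldl (fun ls (k : Nat) => stepA2 ls (k : Int))
        (done ++ todo)
      = done ++ todo.map d2 := by
  induction todo with
  | nil => simp
  | cons x xs ih =>
    intro done
    rw [List.length_cons, List.range'_succ, List.foldl_cons]
    have hstep : stepA2 (done ++ x :: xs) ((done.length : Nat) : Int) = done ++ d2 x :: xs := by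
      unfold stepA2
      rw [Int.toNat_natCast, append_cons_getD]
      by_cases h : tableA.contains x = true
      · rw [if_pos h, append_cons_set]
        have : (tableA.get? x).isSome := by rw [← PySem.Dict.contains_eq_isSome_get?]; exact h
        obtain ⟨v, hv⟩ := Option.isSome_iff_exists.mp this
        simp [d2, hv]
      · rw [if_neg h]
        have hn : tableA.get? x = none := by
          rw [← Option.not_isSome_iff_eq_none, ← PySem.Dict.contains_eq_isSome_get?]
          simpa using h
        simp [d2, hn]
    rw [hstep]
    have := ih (done ++ [d2 x])
    simpa using this

-- ===== pass 3 =====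
lemma pass3_loop (todo : List String) : ∀ (done : List String),
    (List.range' done.length todo.length).foldl (fun ls (k : Nat) => stepA3 ls (k : Int))
        (done ++ todo)
      = done ++ dedup done.getLast? todo := by
  induction todo with
  | nil => simp [dedup]
  | cons x xs ih =>
    intro done
    rw [List.length_cons, List.range'_succ, List.foldl_cons]
    by_cases hd : done = []
    · subst hd
      have hstep : stepA3 ([] ++ x :: xs) ((0 : Nat) : Int) = [] ++ x :: xs := by
        unfold stepA3; simp
      simp only [List.length_nil] at hstep ⊢
      rw [hstep]
      have := ih [x]
      simpa [dedup] using this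
    · have hpos : 0 < done.length := List.length_pos_iff.mpr hd
      have hlast : done.getLast? = some (done.getLast hd) := List.getLast?_eq_some_getLast hd
      have hstep : stepA3 (done ++ x :: xs) ((done.length : Nat) : Int)
          = done ++ (if done.getLast? == some x then "!" else x) :: xs := by
        unfold stepA3
        rw [Int.toNat_natCast, append_cons_getD, append_getD_pred done hd]
        rw [hlast]
        by_cases hx : x = done.getLast hd
        · subst hx
          rw [append_cons_set]
          simp [hpos]
        · have h1 : (x == done.getLast hd) = false := by simp [hx]
          have h2 : (some (done.getLast hd) == some x) = false := by
            simp [Ne.symm hx]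
          simp [h1, h2, hpos]
      rw [hstep]
      set y := if done.getLast? == some x then "!" else x with hy
      have := ih (done ++ [y])
      rw [List.getLast?_concat] at this
      simp only [List.length_append, List.length_singleton, List.append_assoc,
        List.singleton_append] at this
      rw [this, dedup]

-- ===== pass 4 =====
lemma collect_foldl (l : List String) : ∀ (acc : List Char),
    l.foldl (fun acc ch => if ch != "!" && ch != "*" then acc ++ ch.toList else acc) acc
      = acc ++ collect l := by
  induction l with
  | nil => simp [collect]
  | cons x xs ih =>
    intro acc
    simp only [List.foldl_cons, collect, ih]
    split <;> simp

-- ===== assembling A =====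
set_option maxHeartbeats 2000000 in
lemma reducename_eq (Name : String) :
    reducename Name =
      (let red := collect (dedup none ((mapNbr (PySem.Str.lower Name).toList).map d2))
       match PySem.List.pyGet? red (-1) with
       | some c => if c == 'e' then String.ofList red.dropLast else String.ofList red
       | none => "") := by
  unfold reducename
  simp only [PySem.Str.len_eq, foldl_pyRange_zero_nat, List.range_eq_range']
  have h1 := pass1_loop ((PySem.Str.lower Name).toList.length : Int)
    ((PySem.Str.lower Name).toList) [] (by simp)
  simp only [List.length_nil, List.nil_append] at h1
  rw [h1]
  have h2 := pass2_loop (mapNbr (PySem.Str.lower Name).toList) []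
  simp only [List.length_nil, List.nil_append, length_mapNbr] at h2
  rw [h2]
  have h3 := pass3_loop ((mapNbr (PySem.Str.lower Name).toList).map d2) []
  simp only [List.length_nil, List.nil_append, List.length_map, length_mapNbr,
    List.getLast?_nil] at h3
  rw [h3]
  rw [collect_foldl]
  simp only [List.nil_append]

-- ===== B-side lemmas =====

lemma drop_takeWhile_len {α : Type} (p : α → Bool) (l : List α) :
    l.drop (l.takeWhile p).length = l.dropWhile p := by
  nth_rewrite 2 [← List.takeWhile_append_dropWhile (p := p) (l := l)]
  rw [List.drop_left]

lemma head_dropWhile_ne {α : Type} (p : α → Bool) (l : List α) (a : α)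
    (h : (l.dropWhile p).head? = some a) : p a = false := by
  have := List.head?_dropWhile_not p l
  rw [h] at this
  exact this

lemma drop_cons_elim {α : Type} (s : List α) (k : Nat) (x : α) (xs : List α)
    (h : s.drop k = x :: xs) :
    s[k]? = some x ∧ k < s.length ∧ s.drop (k + 1) = xs := by
  have h0 : s[k]? = some x := by
    have hh := (List.getElem?_drop (xs := s) (i := k) (j := 0)).symm
    rw [h] at hh
    simpa using hh
  have hk : k < s.length := by
    by_contra hk
    rw [List.getElem?_eq_none (by omega)] at h0
    cases h0
  have hd : s.drop (k + 1) = xs := by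
    have hh : List.drop 1 (List.drop k s) = List.drop (k + 1) s := List.drop_drop
    rw [h] at hh
    simpa using hh.symm
  exact ⟨h0, hk, hd⟩

lemma tableB_eq : tableB = tableA := rfl

-- Source B's token equals the composition of A's first two passes at that position
lemma tokB_eq (s : List Char) (k : Nat) (x : Char) (xs : List Char)
    (h : s.drop k = x :: xs) :
    tokB s k = d2 (d1 x xs.head?) := by
  obtain ⟨h0, hk, hd⟩ := drop_cons_elim s k x xs h
  unfold tokB
  have hget : PySem.List.pyGetD s (k : Int) ' ' = x := by
    rw [PySem.List.pyGetD_natCast, List.getD_eq_getElem?_getD, h0]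
    rfl
  have hcast1 : ((k : Int) + 1) = (((k + 1 : Nat)) : Int) := by push_cast; ring
  have hcast2 : ((k : Int) + 2) = (((k + 2 : Nat)) : Int) := by push_cast; ring
  have hslice : PySem.List.slice s (some ((k : Int) + 1)) (some ((k : Int) + 2))
      = xs.take 1 := by
    rw [hcast1, hcast2, PySem.List.slice_natCast, hd]
    have h1 : k + 2 - (k + 1) = 1 := by omega
    rw [h1]
  rw [hget, hslice]
  have hnbr : (["e","i","y"].contains (String.ofList (xs.take 1))) = nbrIn xs.head? := by
    cases xs with
    | nil => simp [nbrIn]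
    | cons y ys =>
      have : String.ofList ((y :: ys).take 1) = mkS y := rfl
      rw [this, contains_eiy]
      simp [nbrIn]
  rw [hnbr]
  by_cases hc : x = 'c'
  · subst hc
    by_cases hnb : nbrIn xs.head? = true
    · simp only [hnb, d1]; decide
    · simp only [Bool.not_eq_true] at hnb
      simp only [hnb, d1]; decide
  · by_cases hg : x = 'g'
    · subst hg
      by_cases hnb : nbrIn xs.head? = true
      · simp only [hnb, d1]; decide
      · simp only [Bool.not_eq_true] at hnb
        simp only [hnb, d1]; decide
    · have hb : (x == 'c' || x == 'g') = false := by simp [hc, hg]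
      simp only [hb, Bool.false_eq_true, if_false]
      rw [d1, if_neg hc, if_neg hg, tableB_eq]
      rfl

lemma toks_aux (s : List Char) : ∀ (todo : List Char) (k : Nat), s.drop k = todo →
    (List.range' k todo.length).map (fun i => tokB s i) = (mapNbr todo).map d2 := by
  intro todo
  induction todo with
  | nil => intro k _; simp [mapNbr]
  | cons x xs ih =>
    intro k h
    obtain ⟨_, _, hd⟩ := drop_cons_elim s k x xs h
    rw [List.length_cons, List.range'_succ, List.map_cons, mapNbr, List.map_cons,
      tokB_eq s k x xs h, ih (k + 1) hd]

lemma toks_eq (s : List Char) :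
    (PySem.List.pyRange 0 (s.length : Int) 1).map (fun i => tokB s i.toNat)
      = (mapNbr s).map d2 := by
  rw [PySem.List.pyRange_one]
  have h1 : ((s.length : Int) - 0).toNat = s.length := by omega
  rw [h1, List.map_map]
  have h2 : ((fun i => tokB s i.toNat) ∘ fun k : Nat => (0 : Int) + k)
      = fun k : Nat => tokB s k := by
    funext k
    simp
  rw [h2, List.range_eq_range']
  exact toks_aux s s 0 (by simp)

-- the inner while loop scans exactly the run of tokens equal to x
lemma scanB_spec (toks : List String) (x : String) :
    ∀ (fuel : Nat) (l : List String) (j : Nat), toks.drop j = l → l.length ≤ fuel →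
      scanB toks x fuel j = j + (l.takeWhile (· == x)).length := by
  intro fuel
  induction fuel with
  | zero =>
    intro l j hd hl
    have : l = [] := List.length_eq_zero_iff.mp (Nat.le_zero.mp hl)
    subst this
    simp [scanB]
  | succ fuel ih =>
    intro l j hd hl
    cases l with
    | nil =>
      have hj : toks.length ≤ j := List.drop_eq_nil_iff.mp hd
      rw [scanB]
      have hc : (decide (j < toks.length) && (toks.getD j "" == x)) = false := by
        have : decide (j < toks.length) = false := by simp; omega
        simp [this]
      rw [hc]
      simp
    | cons y l' =>
      obtain ⟨h0, hjlt, hd'⟩ := drop_cons_elim toks j y l' hd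
      have hget : toks.getD j "" = y := by
        rw [List.getD_eq_getElem?_getD, h0]; rfl
      rw [scanB]
      by_cases hyx : (y == x) = true
      · have hc : (decide (j < toks.length) && (toks.getD j "" == x)) = true := by
          rw [hget, hyx]
          simp [hjlt]
        rw [hc, if_pos rfl]
        rw [ih l' (j + 1) hd' (by simp at hl; omega)]
        have ht : (y :: l').takeWhile (· == x) = y :: l'.takeWhile (· == x) := by
          rw [List.takeWhile_cons]; simp [hyx]
        rw [ht]
        simp
        omega
      · have hyx' : (y == x) = false := by simpa using hyx
        have hc : (decide (j < toks.length) && (toks.getD j "" == x)) = false := by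
          rw [hget, hyx']
          simp
        rw [hc]
        simp only [Bool.false_eq_true, if_false]
        have ht : (y :: l').takeWhile (· == x) = [] := by
          rw [List.takeWhile_cons]; simp [hyx']
        rw [ht]
        simp
  -- the outer while loop from index i computes runsL of the remaining tokens

lemma runsB_eq_runsL (toks : List String) :
    ∀ (fuel : Nat) (l : List String), l.length ≤ fuel → ∀ (i : Nat), toks.drop i = l →
      runsB toks fuel i = runsL l := by
  intro fuel
  induction fuel with
  | zero =>
    intro l hl i hd
    have : l = [] := List.length_eq_zero_iff.mp (Nat.le_zero.mp hl)
    subst this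
    simp [runsB, runsL]
  | succ fuel ih =>
    intro l hl i hd
    cases l with
    | nil =>
      have hj : toks.length ≤ i := List.drop_eq_nil_iff.mp hd
      rw [runsB, if_neg (by omega : ¬ i < toks.length)]
      simp [runsL]
    | cons x r =>
      obtain ⟨h0, hilt, hd'⟩ := drop_cons_elim toks i x r hd
      have hget : toks.getD i "" = x := by
        rw [List.getD_eq_getElem?_getD, h0]; rfl
      have hrlen : r.length ≤ toks.length := by
        have := List.length_drop (l := toks) (i := i + 1)
        rw [hd'] at this
        omega
      rw [runsB, if_pos hilt]
      simp only [hget, scanB_spec toks x toks.length r (i + 1) hd' hrlen]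
      have hcount : (i + 1 + (r.takeWhile (· == x)).length - i + 1) / 2
          = ((r.takeWhile (· == x)).length + 2) / 2 := by omega
      have hdroprun : toks.drop (i + 1 + (r.takeWhile (· == x)).length)
          = r.dropWhile (· == x) := by
        rw [← drop_takeWhile_len (· == x) r, ← hd', List.drop_drop]
      have hrest : runsB toks fuel (i + 1 + (r.takeWhile (· == x)).length)
          = runsL (r.dropWhile (· == x)) := by
        apply ih _ _ _ hdroprun
        have h1 := List.length_dropWhile_le (· == x) r
        simp at hl
        omega
      rw [hcount, hrest, runsL]

-- a run of '!' through dedup contributes nothing and leaves prev = some '!'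
lemma run_bang :
    ∀ (t : List String), (∀ y ∈ t, y = "!") → ∀ (rest : List String) (prev : Option String),
      collect (dedup prev (("!" : String) :: (t ++ rest)))
        = collect (dedup (some "!") rest) := by
  intro t
  induction t with
  | nil =>
    intro _ rest prev
    rw [List.nil_append, dedup]
    have hy : (if prev == some ("!" : String) then ("!" : String) else "!") = "!" := by
      split <;> rfl
    simp only [hy, collect]
    rfl
  | cons z t' ih =>
    intro hall rest prev
    have hz : z = "!" := hall z (by simp)
    subst hz
    rw [List.cons_append, dedup]
    have hy : (if prev == some ("!" : String) then ("!" : String) else "!") = "!" := by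
      split <;> rfl
    simp only [hy, collect]
    have := ih (fun y hy => hall y (by simp [hy])) rest (some "!")
    simpa using this

lemma replicate_flatten_succ {α : Type} (k : Nat) (a : List α) :
    (List.replicate (k + 1) a).flatten = a ++ (List.replicate k a).flatten := by
  rw [List.replicate_succ, List.flatten_cons]

-- a run of a non-'!' token through dedup: ceil(L/2) kept copies, known final state
lemma run_aux (x : String) (hx : x ≠ "!") :
    ∀ (N : Nat) (t : List String), t.length ≤ N → (∀ y ∈ t, y = x) →
      ∀ (rest : List String) (prev : Option String), prev ≠ some x →
      ∃ prev', (prev' = some x ∨ prev' = some "!") ∧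
        collect (dedup prev (x :: (t ++ rest)))
          = (if x != "!" && x != "*" then
               (List.replicate ((t.length + 2) / 2) x.toList).flatten else [])
            ++ collect (dedup prev' rest) := by
  intro N
  induction N with
  | zero =>
    intro t hlen hall rest prev hprev
    have : t = [] := List.length_eq_zero_iff.mp (Nat.le_zero.mp hlen)
    subst this
    refine ⟨some x, Or.inl rfl, ?_⟩
    rw [List.nil_append, dedup]
    have hy : (if prev == some x then ("!" : String) else x) = x := by
      rw [if_neg (by simpa using hprev)]
    simp only [hy, collect]
    by_cases hcnd : (x != "!" && x != "*") = true
    · simp [hcnd]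
    · simp only [Bool.not_eq_true] at hcnd
      simp [hcnd]
  | succ N ih =>
    intro t hlen hall rest prev hprev
    cases t with
    | nil =>
      refine ⟨some x, Or.inl rfl, ?_⟩
      rw [List.nil_append, dedup]
      have hy : (if prev == some x then ("!" : String) else x) = x := by
        rw [if_neg (by simpa using hprev)]
      simp only [hy, collect]
      by_cases hcnd : (x != "!" && x != "*") = true
      · simp [hcnd]
      · simp only [Bool.not_eq_true] at hcnd
        simp [hcnd]
    | cons z t' =>
      have hz : z = x := hall z (by simp)
      rw [hz]
      -- peel the first two elements of the run: x then its '!' mark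
      rw [List.cons_append, dedup]
      have hy : (if prev == some x then ("!" : String) else x) = x := by
        rw [if_neg (by simpa using hprev)]
      simp only [hy]
      have hy2 : dedup (some x) (x :: (t' ++ rest))
          = ("!" : String) :: dedup (some "!") (t' ++ rest) := by
        show (if some x == some x then ("!" : String) else x)
            :: dedup (some (if some x == some x then ("!" : String) else x)) (t' ++ rest) = _
        rw [if_pos (by simp)]
      rw [hy2]
      cases t' with
      | nil =>
        refine ⟨some "!", Or.inr rfl, ?_⟩
        rw [List.nil_append]
        simp only [collect]
        by_cases hcnd : (x != "!" && x != "*") = true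
        · simp [hcnd]
        · simp only [Bool.not_eq_true] at hcnd
          simp [hcnd]
      | cons w t'' =>
        have hw : w = x := hall w (by simp)
        rw [hw]
        obtain ⟨prev', hp', heq⟩ := ih t'' (by simp at hlen; omega)
          (fun y hy => hall y (by simp [hy])) rest (some "!")
          (by intro hcon; exact hx (by injection hcon with h'; exact h'.symm))
        refine ⟨prev', hp', ?_⟩
        simp only [collect, List.cons_append]
        rw [heq]
        by_cases hcnd : (x != "!" && x != "*") = true
        · rw [hcnd]
          simp only [if_true]
          have hdiv : ((x :: x :: t'').length + 2) / 2 = (t''.length + 2) / 2 + 1 := by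
            simp only [List.length_cons]
            omega
          rw [hdiv, replicate_flatten_succ]
          have hbang : ((("!" : String) != "!" && ("!" : String) != "*")) = false := by decide
          rw [hbang]
          simp
        · simp only [Bool.not_eq_true] at hcnd
          rw [hcnd]
          have hbang : ((("!" : String) != "!" && ("!" : String) != "*")) = false := by decide
          rw [hbang]
          simp

-- dedup-then-collect equals the run-length form
lemma collect_dedup_eq_runsL :
    ∀ (N : Nat) (l : List String), l.length ≤ N →
      ∀ (prev : Option String), (prev = none ∨ prev = some "!" ∨ prev ≠ l.head?) →
      collect (dedup prev l) = runsL l := by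
  intro N
  induction N with
  | zero =>
    intro l hl prev _
    have : l = [] := List.length_eq_zero_iff.mp (Nat.le_zero.mp hl)
    subst this
    simp [dedup, collect, runsL]
  | succ N ih =>
    intro l hl prev hcompat
    cases l with
    | nil => simp [dedup, collect, runsL]
    | cons x r =>
      have hsplit : r = r.takeWhile (· == x) ++ r.dropWhile (· == x) :=
        (List.takeWhile_append_dropWhile).symm
      have htake : ∀ y ∈ r.takeWhile (· == x), y = x := by
        intro y hy
        have := List.mem_takeWhile_imp hy
        simpa using this
      have hrest_len : (r.dropWhile (· == x)).length ≤ N := by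
        have h1 := List.length_dropWhile_le (· == x) r
        simp at hl
        omega
      have hrest_compat : ∀ p', (p' = some x ∨ p' = some "!") →
          (p' = none ∨ p' = some "!" ∨ p' ≠ (r.dropWhile (· == x)).head?) := by
        intro p' hp'
        rcases hp' with h | h
        · right; right
          rw [h]
          intro hcon
          cases hhead : (r.dropWhile (· == x)).head? with
          | none => rw [hhead] at hcon; cases hcon
          | some a =>
            rw [hhead] at hcon
            have ha : a = x := by injection hcon with h'; exact h'.symm
            have := head_dropWhile_ne (· == x) r a hhead
            rw [ha] at this
            simp at this
        · right; left; exact h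
      by_cases hxb : x = "!"
      · subst hxb
        conv_lhs => rw [hsplit]
        rw [run_bang (r.takeWhile (· == ("!" : String))) htake (r.dropWhile (· == "!")) prev]
        rw [runsL]
        have hcond : ((("!" : String) != "!" && ("!" : String) != "*")) = false := by decide
        rw [hcond]
        simp only [Bool.false_eq_true, if_false, List.nil_append]
        exact ih _ hrest_len (some "!") (Or.inr (Or.inl rfl))
      · have hprev : prev ≠ some x := by
          rcases hcompat with h | h | h
          · rw [h]; intro hcon; cases hcon
          · rw [h]; intro hcon
            exact hxb (by injection hcon with h'; exact h'.symm)
          · simpa using h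
        obtain ⟨prev', hp', heq⟩ := run_aux x hxb (r.takeWhile (· == x)).length
          (r.takeWhile (· == x)) (le_refl _) htake (r.dropWhile (· == x)) prev hprev
        conv_lhs => rw [hsplit]
        rw [heq, runsL]
        congr 1
        exact ih _ hrest_len prev' (hrest_compat prev' hp')

-- ===== assembling B =====
lemma reducename_alt_eq (Name : String) :
    reducename_alt Name =
      (let red := collect (dedup none ((mapNbr (PySem.Str.lower Name).toList).map d2))
       if red != [] && PySem.List.pyGet? red (-1) == some 'e' then
         String.ofList red.dropLast
       else String.ofList red) := by
  unfold reducename_alt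
  simp only []
  rw [toks_eq]
  rw [runsB_eq_runsL ((mapNbr (PySem.Str.lower Name).toList).map d2)
        ((mapNbr (PySem.Str.lower Name).toList).map d2).length
        ((mapNbr (PySem.Str.lower Name).toList).map d2) (le_refl _) 0 (by simp)]
  rw [← collect_dedup_eq_runsL ((mapNbr (PySem.Str.lower Name).toList).map d2).length
        ((mapNbr (PySem.Str.lower Name).toList).map d2) (le_refl _) none (Or.inl rfl)]

-- ===== VERDICT (by name: the statement is the Claim_ definition above) =====
theorem reducename_spec : Claim_equal_reducename := by
  intro Name _ _
  unfold Spec_reducename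
  rw [reducename_eq, reducename_alt_eq]
  simp only []
  set red := collect (dedup none ((mapNbr (PySem.Str.lower Name).toList).map d2)) with hred
  rw [PySem.List.pyGet?_neg_one]
  cases h : red.getLast? with
  | none =>
    have : red = [] := List.getLast?_eq_none_iff.mp h
    simp [this]
  | some c =>
    have hne : red ≠ [] := by
      intro hnil; rw [hnil] at h; simp at h
    by_cases hc : c = 'e' <;> simp [hne, hc]
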